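-- pv_equiv track=rewrite | github.com/ArcProjet/ARC | primitive.py | centralSymetry
-- ===== SOURCE A (Python) =====
-- def gridCopy(grid):
--     res = [[0 for _ in range(len(grid[0]))] for _ in range(len(grid))]
--     for i in range(0, len(grid)):
--         for j in range(0, len(grid[i])):
--             res[i][j] = grid[i][j]
--     return res
--
-- def centralSymetry(grid):
--     if (len(grid) == len(grid[0])):
--         res = gridCopy(grid)
--         for i in range(len(res)):
--             for j in range(len(res[0])):
--                 res[i][j] = grid[j][i]
--         return res
--     else:
--         res2 = gridCopy(grid)
--         return res2
-- ===== SOURCE B (Python) =====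
-- def centralSymetry(grid):
--     res = [row[:] for row in grid]
--     if len(grid) == len(grid[0]):
--         n = len(res)
--         for i in range(n):
--             for j in range(i + 1, n):
--                 res[i][j], res[j][i] = res[j][i], res[i][j]
--     return res
-- ===== Notes on version B (the rewrite author's own statement) =====
-- stated objective: alternative
-- what changed: B copies the grid once and then transposes that copy in place by swapping symmetric pairs over the upper triangle only (diagonal untouched), instead of A's allocate-a-zero-matrix, copy-every-cell, rewrite-every-cell-from-the-source double pass.
-- intended difference: On non-square grids with some row shorter than the first row, A returns the rows zero-padded to the first row's width (an artefact of its zero-initialised buffer), while B returns an exact copy of the rows, which is what the copy branch is meant to do. — e.g. on centralSymetry([[1, 2], [3], [4, 5]]): A returns [[1, 2], [3, 0], [4, 5]], B returns [[1, 2], [3], [4, 5]]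
import Mathlib
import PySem

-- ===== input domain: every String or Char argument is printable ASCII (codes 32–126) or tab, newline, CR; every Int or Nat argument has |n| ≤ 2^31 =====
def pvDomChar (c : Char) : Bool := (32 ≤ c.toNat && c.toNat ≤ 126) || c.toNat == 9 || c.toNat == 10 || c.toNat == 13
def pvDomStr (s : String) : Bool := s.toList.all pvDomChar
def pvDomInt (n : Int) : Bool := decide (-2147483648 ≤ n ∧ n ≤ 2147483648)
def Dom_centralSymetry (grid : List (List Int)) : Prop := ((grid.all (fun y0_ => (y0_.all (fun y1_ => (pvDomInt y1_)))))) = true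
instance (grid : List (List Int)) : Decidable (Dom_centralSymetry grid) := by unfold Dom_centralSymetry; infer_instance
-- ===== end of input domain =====

-- B copies the grid once and transposes the copy in place by swapping the upper-triangle
-- pairs (diagonal untouched) instead of A's zero-buffer + full copy + full rewrite passes;
-- on ragged non-square grids B returns a plain copy where A zero-pads (see D_ below).

-- ===== PORT A =====
-- Indexing grid[i][j] is ported with getD; Pre_ guarantees every such read is in range in Python.
def gridCopyA (grid : List (List Int)) : List (List Int) :=
  let res := List.replicate grid.length (List.replicate (grid.getD 0 []).length (0 : Int))
  (List.range grid.length).foldl (fun res i =>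
    (List.range (grid.getD i []).length).foldl (fun res j =>
      res.set i ((res.getD i []).set j ((grid.getD i []).getD j 0))) res) res

def centralSymetry (grid : List (List Int)) : List (List Int) :=
  if grid.length = (grid.getD 0 []).length then
    let res0 := gridCopyA grid
    (List.range res0.length).foldl (fun res i =>
      (List.range ((res.getD 0 []).length)).foldl (fun res j =>
        res.set i ((res.getD i []).set j ((grid.getD j []).getD i 0))) res) res0
  else
    gridCopyA grid

-- ===== PORT B =====
-- row[:] is a full copy (identity on the value); range(i+1, n) over these nonnegative
-- bounds is exactly List.range' (i+1) (n-(i+1)); the simultaneous swap reads both cells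
-- before writing, written out with lets in evaluation order.
def centralSymetry_alt (grid : List (List Int)) : List (List Int) :=
  let res := grid.map (fun row => row)
  if grid.length = (grid.getD 0 []).length then
    let n := res.length
    (List.range n).foldl (fun res i =>
      (List.range' (i + 1) (n - (i + 1))).foldl (fun res j =>
        let a := (res.getD j []).getD i 0
        let b := (res.getD i []).getD j 0
        let res1 := res.set i ((res.getD i []).set j a)
        res1.set j ((res1.getD j []).set i b)) res) res
  else res

-- ===== PRECONDITION & SPEC =====
-- Pre_ is exactly the set of inputs on which the Python A returns (A raises IndexError on the
-- empty grid, on any row longer than the first row, and on square-count grids with a short row).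
def Pre_centralSymetry (grid : List (List Int)) : Prop :=
  grid ≠ [] ∧ (∀ r ∈ grid, r.length ≤ (grid.getD 0 []).length) ∧
    (grid.length = (grid.getD 0 []).length → ∀ r ∈ grid, r.length = (grid.getD 0 []).length)
instance (grid : List (List Int)) : Decidable (Pre_centralSymetry grid) := by
  unfold Pre_centralSymetry; infer_instance

def pvWitness_centralSymetry : List (List Int) := [[1, 2], [3, 4]]

-- On non-square grids with some row shorter than the first row, A returns the rows zero-padded
-- to the first row's width (an artefact of its zero-initialised buffer), while B returns an
-- exact copy of the rows, which is what the copy branch is meant to do.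
def D_centralSymetry (grid : List (List Int)) : Prop :=
  ∃ r ∈ grid, r.length ≠ (grid.getD 0 []).length
instance (grid : List (List Int)) : Decidable (D_centralSymetry grid) := by
  unfold D_centralSymetry; infer_instance

def Spec_centralSymetry (grid : List (List Int)) (out : List (List Int)) : Prop :=
  ¬ D_centralSymetry grid → out = centralSymetry_alt grid
instance (grid : List (List Int)) (out : List (List Int)) : Decidable (Spec_centralSymetry grid out) := by
  unfold Spec_centralSymetry; infer_instance

def pvDiffWitness_centralSymetry : List (List Int) := [[1, 2], [3], [4, 5]]
def pvDiffWitnessOut_centralSymetry : (List (List Int)) × (List (List Int)) :=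
  ([[1, 2], [3, 0], [4, 5]], [[1, 2], [3], [4, 5]])

-- ===== CLAIM (what is proved, stated in full; the proofs are below) =====
def Claim_unchanged_centralSymetry : Prop := ∀ (grid : List (List Int)), Dom_centralSymetry grid → Pre_centralSymetry grid → Spec_centralSymetry grid (centralSymetry grid)
def Claim_changed_centralSymetry : Prop := Dom_centralSymetry (pvDiffWitness_centralSymetry) ∧ Pre_centralSymetry (pvDiffWitness_centralSymetry) ∧ D_centralSymetry (pvDiffWitness_centralSymetry) ∧ centralSymetry (pvDiffWitness_centralSymetry) = pvDiffWitnessOut_centralSymetry.1 ∧ centralSymetry_alt (pvDiffWitness_centralSymetry) = pvDiffWitnessOut_centralSymetry.2 ∧ pvDiffWitnessOut_centralSymetry.1 ≠ pvDiffWitnessOut_centralSymetry.2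
def Claim_exact_centralSymetry : Prop := ∀ (grid : List (List Int)), Dom_centralSymetry grid → Pre_centralSymetry grid → D_centralSymetry grid → centralSymetry grid ≠ centralSymetry_alt grid

-- ===== LEMMAS AND PROOFS =====

theorem pv_getD_lt {α : Type} (d : α) (l : List α) (k : ℕ) (h : k < l.length) :
    l.getD k d = l[k] := by
  simp [List.getD_eq_getElem?_getD, List.getElem?_eq_getElem, h]

theorem pv_ext_getD {α : Type} (d : α) (l1 l2 : List α) (hl : l1.length = l2.length)
    (h : ∀ k, k < l1.length → l1.getD k d = l2.getD k d) : l1 = l2 := by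
  apply List.ext_getElem hl
  intro k h1 h2
  have := h k h1
  rwa [pv_getD_lt d l1 k h1, pv_getD_lt d l2 k h2] at this

-- a run of in-row writes res[i][j] := g j only touches row i
theorem pv_foldl_set_cell (l : List ℕ) (i : ℕ) (g : ℕ → Int) (res : List (List Int))
    (hi : i < res.length) :
    l.foldl (fun r j => r.set i ((r.getD i []).set j (g j))) res
      = res.set i (l.foldl (fun row j => row.set j (g j)) (res.getD i [])) := by
  induction l generalizing res with
  | nil =>
    simp only [List.foldl_nil]
    rw [pv_getD_lt [] res i hi, List.set_getElem_self]
  | cons a t ih =>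
    simp only [List.foldl_cons]
    rw [ih _ (by simpa using hi)]
    have hget : ((res.set i ((res.getD i []).set a (g a))).getD i []) = (res.getD i []).set a (g a) := by
      rw [pv_getD_lt [] _ i (by simpa using hi)]
      simp [hi]
    rw [hget, List.set_set]

-- writing row[j] := g j for j < m overwrites the first m entries
theorem pv_rowfold_eq (g : ℕ → Int) (row : List Int) (m : ℕ) (h : m ≤ row.length) :
    (List.range m).foldl (fun r j => r.set j (g j)) row
      = (List.range m).map g ++ row.drop m := by
  induction m with
  | zero => simp
  | succ m ih =>
    rw [List.range_succ, List.foldl_append, ih (Nat.le_of_succ_le h)]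
    simp only [List.foldl_cons, List.foldl_nil, List.map_append, List.map_cons, List.map_nil]
    have hm : m < row.length := h
    have hset : (((List.range m).map g) ++ row.drop m).set m (g m)
        = ((List.range m).map g) ++ (row.drop m).set 0 (g m) := by
      rw [List.set_append_right _ _ (by simp)]
      simp
    rw [hset, List.drop_eq_getElem_cons hm, List.set_cons_zero]
    simp

theorem pv_rowfold_length (g : ℕ → Int) (l : List ℕ) (row : List Int) :
    ((l.foldl (fun r j => r.set j (g j)) row)).length = row.length := by
  induction l generalizing row with
  | nil => rfl
  | cons a t ih => simp [List.foldl_cons, ih]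

-- the outer loop: each step replaces row i by F i (current row i)
theorem pv_rowsfold_length (F : ℕ → List Int → List Int) (l : List ℕ) (init : List (List Int)) :
    ((l.foldl (fun res i => res.set i (F i (res.getD i []))) init)).length = init.length := by
  induction l generalizing init with
  | nil => rfl
  | cons a t ih => rw [List.foldl_cons, ih, List.length_set]

theorem pv_rowsfold_getD (F : ℕ → List Int → List Int) (init : List (List Int)) (n : ℕ)
    (hn : n ≤ init.length) (k : ℕ) :
    ((List.range n).foldl (fun res i => res.set i (F i (res.getD i []))) init).getD k []
      = if k < n then F k (init.getD k []) else init.getD k [] := by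
  induction n generalizing k with
  | zero => simp
  | succ n ih =>
    rw [List.range_succ, List.foldl_append]
    simp only [List.foldl_cons, List.foldl_nil]
    have hlen : ((List.range n).foldl (fun res i => res.set i (F i (res.getD i []))) init).length
        = init.length := pv_rowsfold_length _ _ _
    have hn' : n < init.length := hn
    have hget : (((List.range n).foldl (fun res i => res.set i (F i (res.getD i []))) init).getD n [])
        = init.getD n [] := by rw [ih (Nat.le_of_succ_le hn) n]; simp
    rw [hget]
    by_cases hk : k = n
    · subst hk
      rw [if_pos (Nat.lt_succ_self k)]
      rw [pv_getD_lt [] _ k (by rw [List.length_set, hlen]; exact hn')]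
      rw [List.getElem_set_self]
    · have heq : ((((List.range n).foldl (fun res i => res.set i (F i (res.getD i []))) init)).set n
          (F n (init.getD n []))).getD k []
          = (((List.range n).foldl (fun res i => res.set i (F i (res.getD i []))) init)).getD k [] := by
        by_cases hkl : k < init.length
        · rw [pv_getD_lt [] _ k (by rw [List.length_set, hlen]; exact hkl),
              pv_getD_lt [] _ k (by rw [hlen]; exact hkl)]
          simp only [List.getElem_set]
          rw [if_neg (fun h => hk h.symm)]
        · rw [List.getD_eq_getElem?_getD,
              List.getElem?_eq_none (by rw [List.length_set, hlen]; omega),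
              List.getD_eq_getElem?_getD,
              List.getElem?_eq_none (by rw [hlen]; omega)]
      rw [heq, ih (Nat.le_of_succ_le hn) k]
      by_cases hkn : k < n
      · simp [hkn, Nat.lt_succ_of_lt hkn]
      · have hj : ¬ k < n + 1 := by omega
        simp [hkn, hj]

theorem pv_map_getD_range (row : List Int) :
    (List.range row.length).map (fun j => row.getD j 0) = row := by
  apply List.ext_getElem (by simp)
  intro k h1 h2
  simp only [List.getElem_map, List.getElem_range]
  rw [pv_getD_lt 0 row k h2]

theorem pv_range_map_getD (l : List (List Int)) (f : List Int → Int) :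
    (List.range l.length).map (fun j => f (l.getD j [])) = l.map f := by
  apply List.ext_getElem (by simp)
  intro k h1 h2
  simp only [List.getElem_map, List.getElem_range]
  rw [pv_getD_lt [] l k (by simpa using h2)]

-- foldl congruence under an invariant
theorem pv_foldl_congr_inv {α β : Type} (P : β → Prop) (l : List α)
    (f g : β → α → β) (b : β) (hP : P b)
    (hpres : ∀ x ∈ l, ∀ y, P y → P (g y x))
    (heq : ∀ x ∈ l, ∀ y, P y → f y x = g y x) :
    l.foldl f b = l.foldl g b := by
  induction l generalizing b with
  | nil => rfl
  | cons a t ih =>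
    simp only [List.foldl_cons]
    rw [heq a (by simp) b hP]
    exact ih (g b a) (hpres a (by simp) b hP)
      (fun x hx y hy => hpres x (by simp [hx]) y hy)
      (fun x hx y hy => heq x (by simp [hx]) y hy)

-- gridCopy returns each row padded with zeros to the width of the first row
theorem pv_gridCopyA_eq (grid : List (List Int))
    (h : ∀ r ∈ grid, r.length ≤ (grid.getD 0 []).length) :
    gridCopyA grid
      = grid.map (fun r => r ++ List.replicate ((grid.getD 0 []).length - r.length) (0 : Int)) := by
  unfold gridCopyA
  simp only []
  rw [pv_foldl_congr_inv (fun res => res.length = grid.length) _ _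
      (fun res i => res.set i ((List.range (grid.getD i []).length).foldl
        (fun row j => row.set j ((grid.getD i []).getD j 0)) (res.getD i [])))
      _ (by simp)
      (fun x hx y hy => by simpa using hy)
      (fun i hi res hres =>
        pv_foldl_set_cell _ i _ res (by rw [hres]; exact List.mem_range.mp hi))]
  have hlen := pv_rowsfold_length
    (fun i row => (List.range (grid.getD i []).length).foldl
      (fun row j => row.set j ((grid.getD i []).getD j 0)) row)
    (List.range grid.length)
    (List.replicate grid.length (List.replicate (grid.getD 0 []).length 0))
  apply pv_ext_getD []
  · rw [hlen]; simp
  · intro k hk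
    rw [hlen] at hk
    simp only [List.length_replicate] at hk
    rw [pv_rowsfold_getD
      (fun i row => (List.range (grid.getD i []).length).foldl
        (fun row j => row.set j ((grid.getD i []).getD j 0)) row)
      (List.replicate grid.length (List.replicate (grid.getD 0 []).length 0))
      grid.length (by simp) k, if_pos hk]
    have hrep : (List.replicate grid.length (List.replicate (grid.getD 0 []).length (0:Int))).getD k []
        = List.replicate (grid.getD 0 []).length (0:Int) := by
      rw [pv_getD_lt [] _ k (by simpa using hk)]; simp
    rw [hrep]
    have hmem : grid.getD k [] ∈ grid := by
      rw [pv_getD_lt [] _ k hk]; exact List.getElem_mem hk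
    have hle : (grid.getD k []).length ≤ (grid.getD 0 []).length := h _ hmem
    rw [pv_rowfold_eq _ _ _ (by simpa using hle), pv_map_getD_range, List.drop_replicate]
    rw [pv_getD_lt []
      (grid.map (fun r => r ++ List.replicate ((grid.getD 0 []).length - r.length) (0:Int)))
      k (by simpa using hk), List.getElem_map, pv_getD_lt [] grid k hk]

-- the transpose loop of A on an n×n grid produces the list of columns
theorem pv_transposeA_eq (grid : List (List Int)) (hne : grid ≠ [])
    (hsq : ∀ r ∈ grid, r.length = grid.length) :
    (List.range grid.length).foldl (fun res i =>
      (List.range ((res.getD 0 []).length)).foldl (fun res j =>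
        res.set i ((res.getD i []).set j ((grid.getD j []).getD i 0))) res) grid
    = (List.range grid.length).map (fun i => grid.map (fun r => r.getD i 0)) := by
  have hpos : 0 < grid.length := List.length_pos_iff.mpr hne
  rw [pv_foldl_congr_inv (fun res => res.length = grid.length ∧ ∀ r ∈ res, r.length = grid.length)
      _ _
      (fun res i => res.set i ((List.range grid.length).foldl
        (fun row j => row.set j ((grid.getD j []).getD i 0)) (res.getD i [])))
      _ ⟨rfl, hsq⟩ ?_ ?_]
  · have hlen := pv_rowsfold_length
      (fun i row => (List.range grid.length).foldl
        (fun row j => row.set j ((grid.getD j []).getD i 0)) row)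
      (List.range grid.length) grid
    apply pv_ext_getD []
    · rw [hlen]; simp
    · intro k hk
      rw [hlen] at hk
      rw [pv_rowsfold_getD
        (fun i row => (List.range grid.length).foldl
          (fun row j => row.set j ((grid.getD j []).getD i 0)) row)
        grid grid.length (le_refl _) k, if_pos hk]
      have hmem : grid.getD k [] ∈ grid := by
        rw [pv_getD_lt [] _ k hk]; exact List.getElem_mem hk
      have hlen : (grid.getD k []).length = grid.length := hsq _ hmem
      rw [pv_rowfold_eq _ _ _ (by omega)]
      rw [show grid.length = (grid.getD k []).length from hlen.symm]
      simp only [List.drop_length, List.append_nil]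
      rw [hlen]
      rw [pv_getD_lt [] ((List.range grid.length).map fun i => grid.map fun r => r.getD i 0) k
        (by simpa using hk)]
      rw [List.getElem_map, List.getElem_range]
      exact pv_range_map_getD grid (fun r => r.getD k 0)
  · intro i hi res hres
    refine ⟨by simpa using hres.1, ?_⟩
    intro r hr
    rcases List.mem_or_eq_of_mem_set hr with hr' | hr'
    · exact hres.2 r hr'
    · rw [hr', pv_rowfold_length]
      apply hres.2
      rw [pv_getD_lt [] _ _ (by rw [hres.1]; exact List.mem_range.mp hi)]
      exact List.getElem_mem _
  · intro i hi res hres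
    have h0 : (res.getD 0 []).length = grid.length := by
      apply hres.2
      rw [pv_getD_lt [] _ 0 (by rw [hres.1]; exact hpos)]
      exact List.getElem_mem _
    rw [h0]
    exact pv_foldl_set_cell _ i _ res (by rw [hres.1]; exact List.mem_range.mp hi)

-- ---- B-side machinery: the triangular swap as an action on index functions ----

def pvStep (i j : ℕ) (res : List (List Int)) : List (List Int) :=
  let a := (res.getD j []).getD i 0
  let b := (res.getD i []).getD j 0
  let res1 := res.set i ((res.getD i []).set j a)
  res1.set j ((res1.getD j []).set i b)

def pvMk (n : ℕ) (f : ℕ → ℕ → Int) : List (List Int) :=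
  (List.range n).map (fun p => (List.range n).map (f p))

def pvSwapF (i j : ℕ) (f : ℕ → ℕ → Int) : ℕ → ℕ → Int :=
  fun p q => if p = i ∧ q = j then f j i else if p = j ∧ q = i then f i j else f p q

theorem pv_mk_congr (n : ℕ) (f g : ℕ → ℕ → Int)
    (h : ∀ p < n, ∀ q < n, f p q = g p q) : pvMk n f = pvMk n g := by
  unfold pvMk
  apply List.map_congr_left
  intro p hp
  apply List.map_congr_left
  intro q hq
  exact h p (List.mem_range.mp hp) q (List.mem_range.mp hq)

theorem pv_swapF_cell (i j p q : ℕ) (hij : i ≠ j) (f : ℕ → ℕ → Int) :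
    pvSwapF i j f p q
      = if j = p then (if i = q then f i j else f j q)
        else if i = p then (if j = q then f j i else f i q) else f p q := by
  unfold pvSwapF
  by_cases h1 : j = p
  · rw [if_pos h1]
    by_cases h2 : i = q
    · rw [if_pos h2, if_neg (fun h => hij ((h1.trans h.1).symm)), if_pos ⟨h1.symm, h2.symm⟩]
    · rw [if_neg h2, if_neg (fun h => hij ((h1.trans h.1).symm)),
          if_neg (fun h => h2 h.2.symm), h1]
  · rw [if_neg h1]
    by_cases h2 : i = p
    · rw [if_pos h2]
      by_cases h3 : j = q
      · rw [if_pos h3, if_pos ⟨h2.symm, h3.symm⟩]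
      · rw [if_neg h3, if_neg (fun h => h3 h.2.symm),
          if_neg (fun h => hij (h2.trans h.1)), h2]
    · rw [if_neg h2, if_neg (fun h => h2 h.1.symm), if_neg (fun h => h1 h.1.symm)]

theorem pv_step_mk (n i j : ℕ) (hi : i < n) (hj : j < n) (hij : i ≠ j) (f : ℕ → ℕ → Int) :
    pvStep i j (pvMk n f) = pvMk n (pvSwapF i j f) := by
  have hmk_get : ∀ (g : ℕ → ℕ → Int) (p : ℕ), p < n → (pvMk n g).getD p [] = (List.range n).map (g p) := by
    intro g p hp
    rw [pv_getD_lt [] _ p (by simp [pvMk, hp])]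
    simp [pvMk]
  have hrow_get : ∀ (g : ℕ → Int) (q : ℕ), q < n → ((List.range n).map g).getD q 0 = g q := by
    intro g q hq
    rw [pv_getD_lt 0 _ q (by simpa using hq)]
    simp
  unfold pvStep
  simp only []
  rw [hmk_get f j hj, hmk_get f i hi, hrow_get (f j) i hi, hrow_get (f i) j hj]
  have h1get : ((pvMk n f).set i (((List.range n).map (f i)).set j (f j i))).getD j []
      = (List.range n).map (f j) := by
    rw [pv_getD_lt [] _ j (by simp [pvMk, hj])]
    rw [List.getElem_set]
    rw [if_neg hij]
    simp [pvMk, hj]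
  rw [h1get]
  apply List.ext_getElem
  · simp [pvMk]
  · intro p hp1 hp2
    simp only [pvMk, List.length_map, List.length_range] at hp2
    simp only [List.getElem_set, pvMk, List.getElem_map, List.getElem_range]
    by_cases hjp : j = p
    · rw [if_pos hjp]
      apply List.ext_getElem (by simp)
      intro q hq1 hq2
      simp only [List.length_map, List.length_range] at hq2
      simp only [List.getElem_set, List.getElem_map, List.getElem_range]
      rw [pv_swapF_cell i j p q hij f, if_pos hjp]
    · rw [if_neg hjp]
      by_cases hip : i = p
      · rw [if_pos hip]
        apply List.ext_getElem (by simp)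
        intro q hq1 hq2
        simp only [List.length_map, List.length_range] at hq2
        simp only [List.getElem_set, List.getElem_map, List.getElem_range]
        rw [pv_swapF_cell i j p q hij f, if_neg hjp, if_pos hip]
      · rw [if_neg hip]
        apply List.map_congr_left
        intro q _
        rw [pv_swapF_cell i j p q hij f, if_neg hjp, if_neg hip]

theorem pv_foldl_pairs_mk (L : List (ℕ × ℕ)) (n : ℕ) (f : ℕ → ℕ → Int)
    (h : ∀ p ∈ L, p.1 < n ∧ p.2 < n ∧ p.1 ≠ p.2) :
    L.foldl (fun res ij => pvStep ij.1 ij.2 res) (pvMk n f)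
      = pvMk n (L.foldl (fun f ij => pvSwapF ij.1 ij.2 f) f) := by
  induction L generalizing f with
  | nil => rfl
  | cons a t ih =>
    simp only [List.foldl_cons]
    obtain ⟨h1, h2, h3⟩ := h a (by simp)
    rw [pv_step_mk n a.1 a.2 h1 h2 h3 f]
    exact ih _ (fun p hp => h p (by simp [hp]))

theorem pv_foldl_nested {σ : Type} (l : List ℕ) (g : ℕ → List ℕ) (h : ℕ → ℕ → σ → σ) (init : σ) :
    l.foldl (fun s i => (g i).foldl (fun s j => h i j s) s) init
      = (l.flatMap (fun i => (g i).map (fun j => (i, j)))).foldl (fun s ij => h ij.1 ij.2 s) init := by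
  induction l generalizing init with
  | nil => rfl
  | cons a t ih =>
    simp only [List.foldl_cons, List.flatMap_cons, List.foldl_append, List.foldl_map]
    exact ih _

def pvPairs (n : ℕ) : List (ℕ × ℕ) :=
  (List.range n).flatMap (fun i => (List.range' (i + 1) (n - (i + 1))).map (fun j => (i, j)))

theorem pv_mem_pairs (n i j : ℕ) : (i, j) ∈ pvPairs n ↔ i < j ∧ j < n := by
  unfold pvPairs
  simp only [List.mem_flatMap, List.mem_map, List.mem_range, Prod.mk.injEq, List.mem_range']
  constructor
  · rintro ⟨a, ha, b, ⟨k, hk, rfl⟩, rfl, rfl⟩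
    omega
  · intro ⟨h1, h2⟩
    exact ⟨i, by omega, j, ⟨j - (i + 1), by omega, by omega⟩, rfl, rfl⟩

theorem pv_nodup_flatMap {α β : Type} (l : List α) (f : α → List β)
    (hf : ∀ x ∈ l, (f x).Nodup)
    (hkey : ∀ x ∈ l, ∀ y ∈ l, ∀ b, b ∈ f x → b ∈ f y → x = y)
    (hl : l.Nodup) : (l.flatMap f).Nodup := by
  induction l with
  | nil => simp
  | cons a t ih =>
    simp only [List.flatMap_cons]
    apply List.Nodup.append (hf a (by simp))
      (ih (fun x hx => hf x (by simp [hx]))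
          (fun x hx y hy b hbx hby => hkey x (by simp [hx]) y (by simp [hy]) b hbx hby)
          (List.Nodup.of_cons hl))
    intro b hba hbt
    rcases List.mem_flatMap.mp hbt with ⟨x, hx, hbx⟩
    have : a = x := hkey a (by simp) x (by simp [hx]) b hba hbx
    subst this
    exact (List.nodup_cons.mp hl).1 hx

theorem pv_nodup_pairs (n : ℕ) : (pvPairs n).Nodup := by
  unfold pvPairs
  apply pv_nodup_flatMap
  · intro x _
    exact List.Nodup.map (fun a b h => (Prod.mk.injEq _ _ _ _).mp h |>.2) (List.nodup_range')
  · intro x _ y _ b hbx hby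
    rcases List.mem_map.mp hbx with ⟨j, _, rfl⟩
    rcases List.mem_map.mp hby with ⟨j', _, he⟩
    exact ((Prod.mk.injEq _ _ _ _).mp he).1.symm
  · exact List.nodup_range

theorem pv_swapfold (L : List (ℕ × ℕ)) (hlt : ∀ p ∈ L, p.1 < p.2) (hnd : L.Nodup)
    (f : ℕ → ℕ → Int) (p q : ℕ) :
    (L.foldl (fun f ij => pvSwapF ij.1 ij.2 f) f) p q
      = if p ≠ q ∧ (min p q, max p q) ∈ L then f q p else f p q := by
  induction L generalizing f with
  | nil => simp
  | cons c t ih =>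
    obtain ⟨a, b⟩ := c
    have hab : a < b := hlt (a, b) (by simp)
    have hnt : (a, b) ∉ t := (List.nodup_cons.mp hnd).1
    simp only [List.foldl_cons]
    rw [ih (fun x hx => hlt x (by simp [hx])) (List.nodup_cons.mp hnd).2]
    by_cases hpq : p = q
    · subst hpq
      simp only [ne_eq, not_true_eq_false, false_and, if_false]
      simp [pvSwapF]
      omega
    · simp only [ne_eq, hpq, not_false_eq_true, true_and]
      by_cases hmem : (min p q, max p q) ∈ t
      · rw [if_pos hmem, if_pos (by simp [hmem])]
        have hne : ¬((min p q, max p q) = (a, b)) := fun h => hnt (h ▸ hmem)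
        simp only [pvSwapF]
        rw [if_neg, if_neg]
        · intro ⟨h1, h2⟩
          apply hne
          simp only [Prod.mk.injEq]
          omega
        · intro ⟨h1, h2⟩
          apply hne
          simp only [Prod.mk.injEq]
          omega
      · rw [if_neg hmem]
        by_cases hhd : (min p q, max p q) = (a, b)
        · rw [if_pos (by simp [hhd])]
          have hpair : min p q = a ∧ max p q = b := (Prod.mk.injEq _ _ _ _).mp hhd
          simp only [pvSwapF]
          by_cases hpa : p = a
          · have hqb : q = b := by omega
            rw [if_pos ⟨hpa, hqb⟩, hpa, hqb]
          · have hpb : p = b := by omega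
            have hqa : q = a := by omega
            rw [if_neg (fun h => hpa h.1), if_pos ⟨hpb, hqa⟩, hpb, hqa]
        · rw [if_neg (by simp [hmem, hhd])]
          simp only [pvSwapF]
          rw [if_neg, if_neg]
          · intro ⟨h1, h2⟩
            apply hhd
            simp only [Prod.mk.injEq]
            omega
          · intro ⟨h1, h2⟩
            apply hhd
            simp only [Prod.mk.injEq]
            omega

-- a square rectangular grid is pvMk of its own cell function
theorem pv_grid_eq_mk (grid : List (List Int))
    (hsq : ∀ r ∈ grid, r.length = grid.length) :
    grid = pvMk grid.length (fun p q => (grid.getD p []).getD q 0) := by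
  apply List.ext_getElem (by simp [pvMk])
  intro p hp1 hp2
  simp only [pvMk, List.getElem_map, List.getElem_range]
  rw [show (List.range grid.length) = (List.range (grid[p]).length) by
    rw [hsq _ (List.getElem_mem hp1)]]
  rw [show (fun q => (grid.getD p []).getD q 0) = (fun q => (grid[p]).getD q 0) by
    funext q; rw [pv_getD_lt [] grid p hp1]]
  exact (pv_map_getD_range grid[p]).symm

-- B's triangular pass on a square rectangular grid yields the list of columns
theorem pv_altSquare_eq (grid : List (List Int)) (hne : grid ≠ [])
    (hsq : ∀ r ∈ grid, r.length = grid.length) :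
    (List.range grid.length).foldl (fun res i =>
      (List.range' (i + 1) (grid.length - (i + 1))).foldl (fun res j =>
        let a := (res.getD j []).getD i 0
        let b := (res.getD i []).getD j 0
        let res1 := res.set i ((res.getD i []).set j a)
        res1.set j ((res1.getD j []).set i b)) res) grid
    = (List.range grid.length).map (fun i => grid.map (fun r => r.getD i 0)) := by
  have hstep : (fun (res : List (List Int)) (i : ℕ) =>
      (List.range' (i + 1) (grid.length - (i + 1))).foldl (fun res j =>
        let a := (res.getD j []).getD i 0
        let b := (res.getD i []).getD j 0
        let res1 := res.set i ((res.getD i []).set j a)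
        res1.set j ((res1.getD j []).set i b)) res)
      = (fun res i => (List.range' (i + 1) (grid.length - (i + 1))).foldl
          (fun res j => pvStep i j res) res) := rfl
  rw [hstep]
  rw [pv_foldl_nested (List.range grid.length)
      (fun i => List.range' (i + 1) (grid.length - (i + 1)))
      (fun i j res => pvStep i j res) grid]
  rw [show ((List.range grid.length).flatMap
      (fun i => (List.range' (i + 1) (grid.length - (i + 1))).map (fun j => (i, j))))
      = pvPairs grid.length from rfl]
  have hbound : ∀ p ∈ pvPairs grid.length, p.1 < grid.length ∧ p.2 < grid.length ∧ p.1 ≠ p.2 := by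
    intro p hp
    obtain ⟨i, j⟩ := p
    have := (pv_mem_pairs grid.length i j).mp hp
    exact ⟨by omega, this.2, by omega⟩
  calc (pvPairs grid.length).foldl (fun res ij => pvStep ij.1 ij.2 res) grid
      = (pvPairs grid.length).foldl (fun res ij => pvStep ij.1 ij.2 res)
          (pvMk grid.length (fun p q => (grid.getD p []).getD q 0)) := by
        rw [← pv_grid_eq_mk grid hsq]
    _ = pvMk grid.length ((pvPairs grid.length).foldl (fun f ij => pvSwapF ij.1 ij.2 f)
          (fun p q => (grid.getD p []).getD q 0)) := pv_foldl_pairs_mk _ _ _ hbound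
    _ = pvMk grid.length (fun p q => (grid.getD q []).getD p 0) := by
        apply pv_mk_congr
        intro p hp q hq
        rw [pv_swapfold (pvPairs grid.length)
          (fun x hx => by obtain ⟨i, j⟩ := x; exact ((pv_mem_pairs grid.length i j).mp hx).1)
          (pv_nodup_pairs grid.length)]
        by_cases hpq : p = q
        · subst hpq; simp
        · rw [if_pos ⟨hpq, (pv_mem_pairs grid.length _ _).mpr ⟨by omega, by omega⟩⟩]
    _ = (List.range grid.length).map (fun i => grid.map (fun r => r.getD i 0)) := by
        unfold pvMk
        apply List.map_congr_left
        intro p _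
        exact pv_range_map_getD grid (fun r => r.getD p 0)

-- shared: the value of both ports on a square rectangular grid
theorem pv_A_square (grid : List (List Int)) (hne : grid ≠ [])
    (hsqc : grid.length = (grid.getD 0 []).length)
    (hle : ∀ r ∈ grid, r.length ≤ (grid.getD 0 []).length)
    (hsq : ∀ r ∈ grid, r.length = grid.length) :
    centralSymetry grid = (List.range grid.length).map (fun i => grid.map (fun r => r.getD i 0)) := by
  unfold centralSymetry
  rw [if_pos hsqc]
  have hcopy : gridCopyA grid = grid := by
    rw [pv_gridCopyA_eq grid hle]
    have : ∀ r ∈ grid, r ++ List.replicate ((grid.getD 0 []).length - r.length) (0:Int) = r := by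
      intro r hr
      rw [← hsqc, hsq r hr]
      simp
    calc grid.map (fun r => r ++ List.replicate ((grid.getD 0 []).length - r.length) (0:Int))
        = grid.map id := List.map_congr_left (fun r hr => this r hr)
      _ = grid := List.map_id grid
  simp only []
  rw [hcopy]
  exact pv_transposeA_eq grid hne hsq

theorem pv_alt_eval (grid : List (List Int)) (hne : grid ≠ []) :
    centralSymetry_alt grid
      = if grid.length = (grid.getD 0 []).length then
          (List.range grid.length).foldl (fun res i =>
            (List.range' (i + 1) (grid.length - (i + 1))).foldl (fun res j =>
              let a := (res.getD j []).getD i 0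
              let b := (res.getD i []).getD j 0
              let res1 := res.set i ((res.getD i []).set j a)
              res1.set j ((res1.getD j []).set i b)) res) grid
        else grid := by
  unfold centralSymetry_alt
  simp only [List.map_id', List.length_map]

-- ===== VERDICT (by name: the statement is the Claim_ definition above) =====
theorem centralSymetry_spec : Claim_unchanged_centralSymetry := by
  intro grid _ hpre hnd
  obtain ⟨hne, hle, hsqimp⟩ := hpre
  have hrect : ∀ r ∈ grid, r.length = (grid.getD 0 []).length := by
    intro r hr
    by_contra hc
    exact hnd ⟨r, hr, hc⟩
  rw [pv_alt_eval grid hne]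
  by_cases hsqc : grid.length = (grid.getD 0 []).length
  · have hsq : ∀ r ∈ grid, r.length = grid.length := fun r hr => by rw [hrect r hr, hsqc]
    rw [if_pos hsqc, pv_A_square grid hne hsqc hle hsq]
    exact (pv_altSquare_eq grid hne hsq).symm
  · rw [if_neg hsqc]
    unfold centralSymetry
    rw [if_neg hsqc, pv_gridCopyA_eq grid hle]
    calc grid.map (fun r => r ++ List.replicate ((grid.getD 0 []).length - r.length) (0:Int))
        = grid.map id := List.map_congr_left (fun r hr => by rw [hrect r hr]; simp)
      _ = grid := List.map_id grid

theorem centralSymetry_changed : Claim_changed_centralSymetry := by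
  unfold Claim_changed_centralSymetry; decide

theorem centralSymetry_tight : Claim_exact_centralSymetry := by
  intro grid _ hpre hd
  obtain ⟨hne, hle, hsqimp⟩ := hpre
  obtain ⟨r, hr, hrne⟩ := hd
  have hsqc : grid.length ≠ (grid.getD 0 []).length := fun h => hrne (hsqimp h r hr)
  obtain ⟨k, hk, hrk⟩ := List.mem_iff_getElem.mp hr
  intro heq
  rw [pv_alt_eval grid hne, if_neg hsqc] at heq
  unfold centralSymetry at heq
  rw [if_neg hsqc, pv_gridCopyA_eq grid hle] at heq
  have := congrArg (fun l => (l.getD k []).length) heq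
  simp only [] at this
  rw [pv_getD_lt [] _ k (by simpa using hk), pv_getD_lt [] grid k hk, List.getElem_map] at this
  simp only [List.length_append, List.length_replicate] at this
  have hlek : (grid[k]).length ≤ (grid.getD 0 []).length := hle _ (List.getElem_mem hk)
  rw [← hrk] at hrne
  omega
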